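-- pv_equiv track=rewrite | github.com/MichaelGerg/parse-run-summary | parse_run_summary.py | struct_read
-- ===== SOURCE A (Python) =====
-- def struct_read(list):
--     struct = []
--     temp_list = []
--     intial = False
--     for line in list:
--         if line[0] == "lane":
--             struct.append(temp_list)
--             temp_list = []
--         temp_list.append(line)
--     struct.append(temp_list)
--     del struct[0]
--     return struct
-- ===== SOURCE B (Python) =====
-- def struct_read(list):
--     lanes = [i for i, line in enumerate(list) if line[0] == "lane"]
--     bounds = lanes + [len(list)]
--     return [list[bounds[j]:bounds[j + 1]] for j in range(len(lanes))]
-- ===== Notes on version B (the rewrite author's own statement) =====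
-- stated objective: alternative
-- what changed: Replaces A's running accumulator (flush temp list at each lane marker, append sentinel group, delete the leading prefix group) by collecting the lane-marker indices in one pass and slicing the input between consecutive indices.
import Mathlib
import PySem

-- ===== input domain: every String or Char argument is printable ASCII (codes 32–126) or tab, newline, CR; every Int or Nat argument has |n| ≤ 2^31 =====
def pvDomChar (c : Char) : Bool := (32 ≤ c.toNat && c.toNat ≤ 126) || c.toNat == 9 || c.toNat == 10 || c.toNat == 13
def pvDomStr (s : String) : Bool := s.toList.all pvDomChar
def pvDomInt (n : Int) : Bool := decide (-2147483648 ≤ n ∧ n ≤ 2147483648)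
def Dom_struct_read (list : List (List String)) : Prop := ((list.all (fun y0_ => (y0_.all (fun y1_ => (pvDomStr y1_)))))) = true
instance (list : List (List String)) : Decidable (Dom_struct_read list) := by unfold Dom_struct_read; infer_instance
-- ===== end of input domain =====

-- B rebuilds the groups by slicing the input between the collected lane-marker indices
-- instead of A's running accumulator; objective: alternative decomposition (same cost).

-- ===== PORT A =====
-- one loop iteration: flush temp_list on a lane marker, then append the line
-- line[0] is ported as pyGetD line 0 "": exact under Pre_ (every line nonempty)
def stepA (st : List (List (List String)) × List (List String)) (line : List String) :
    List (List (List String)) × List (List String) :=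
  let st' := if PySem.List.pyGetD line 0 "" == "lane" then (st.1 ++ [st.2], ([] : List (List String))) else st
  (st'.1, st'.2 ++ [line])

def struct_read (list : List (List String)) : List (List (List String)) :=
  let st := list.foldl stepA (([] : List (List (List String))), ([] : List (List String)))
  -- struct.append(temp_list); del struct[0] — the list st.1 ++ [st.2] is nonempty, so `.tail` is exact
  (st.1 ++ [st.2]).tail

-- ===== PORT B =====
def struct_read_alt (list : List (List String)) : List (List (List String)) :=
  -- lanes = [i for i, line in enumerate(list) if line[0] == "lane"]
  let lanes : List Int := (PySem.List.enumerate list).filterMap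
    (fun p => if PySem.List.pyGetD p.2 0 "" == "lane" then some p.1 else none)
  -- bounds = lanes + [len(list)]
  let bounds : List Int := lanes ++ [PySem.List.len list]
  -- [list[bounds[j]:bounds[j+1]] for j in range(len(lanes))]
  (List.range lanes.length).map
    (fun j => PySem.List.slice list (some (bounds.getD j 0)) (some (bounds.getD (j + 1) 0)))

-- ===== PRECONDITION & SPEC =====
-- Pre_ excludes inputs containing an empty line, on which Python A raises IndexError at line[0]
def Pre_struct_read (list : List (List String)) : Prop := ∀ line ∈ list, line ≠ []
instance (list : List (List String)) : Decidable (Pre_struct_read list) := by unfold Pre_struct_read; infer_instance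
def pvWitness_struct_read : List (List String) := [["lane", "1"], ["a"], ["lane", "2"], ["b"]]

def Spec_struct_read (list : List (List String)) (out : List (List (List String))) : Prop := out = struct_read_alt list
instance (list : List (List String)) (out : List (List (List String))) : Decidable (Spec_struct_read list out) := by unfold Spec_struct_read; infer_instance

-- ===== CLAIM (what is proved, stated in full; the proofs are below) =====
def Claim_equal_struct_read : Prop := ∀ (list : List (List String)), Dom_struct_read list → Pre_struct_read list → Spec_struct_read list (struct_read list)

-- ===== LEMMAS AND PROOFS =====

def isLane (line : List String) : Bool := PySem.List.pyGetD line 0 "" == "lane"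

-- the group list from A's viewpoint: current temp, then remaining lines
def grp (temp : List (List String)) : List (List String) → List (List (List String))
  | [] => [temp]
  | x :: xs => if isLane x then temp :: grp [x] xs else grp (temp ++ [x]) xs

-- the common value: groups from the first lane marker onward
def F : List (List String) → List (List (List String))
  | [] => []
  | x :: xs => if isLane x then grp [x] xs else F xs

-- lane indices, recursively
def lanesOf : List (List String) → List Nat
  | [] => []
  | x :: xs => (if isLane x then [0] else []) ++ (lanesOf xs).map (· + 1)

def bnd (list : List (List String)) (j : Nat) : Nat := (lanesOf list ++ [list.length]).getD j 0

-- B's value written over Nat indices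
def Bspec (list : List (List String)) : List (List (List String)) :=
  (List.range (lanesOf list).length).map (fun j => (list.drop (bnd list j)).take (bnd list (j + 1) - bnd list j))

theorem stepA_lane (struct : List (List (List String))) (temp : List (List String))
    (x : List String) (h : isLane x = true) : stepA (struct, temp) x = (struct ++ [temp], [x]) := by
  simp only [isLane] at h
  simp [stepA, h]

theorem stepA_not_lane (struct : List (List (List String))) (temp : List (List String))
    (x : List String) (h : ¬ isLane x = true) : stepA (struct, temp) x = (struct, temp ++ [x]) := by
  simp only [isLane] at h
  simp [stepA, h]

theorem foldl_stepA (l : List (List String)) :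
    ∀ struct temp, ((l.foldl stepA (struct, temp)).1 ++ [(l.foldl stepA (struct, temp)).2]) = struct ++ grp temp l := by
  induction l with
  | nil => intro struct temp; simp [grp]
  | cons x xs ih =>
    intro struct temp
    by_cases h : isLane x
    · rw [List.foldl_cons, stepA_lane _ _ _ h, ih, grp, if_pos h]
      simp
    · rw [List.foldl_cons, stepA_not_lane _ _ _ h, ih, grp, if_neg h]

theorem grp_tail (l : List (List String)) : ∀ temp, (grp temp l).tail = F l := by
  induction l with
  | nil => intro temp; simp [grp, F]
  | cons x xs ih =>
    intro temp
    by_cases h : isLane x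
    · rw [grp, if_pos h, F, if_pos h, List.tail_cons]
    · rw [grp, if_neg h, F, if_neg h, ih]

theorem struct_read_eq_F (l : List (List String)) : struct_read l = F l := by
  have h := foldl_stepA l [] []
  rw [List.nil_append] at h
  show ((l.foldl stepA ([], [])).1 ++ [(l.foldl stepA ([], [])).2]).tail = F l
  rw [h, grp_tail]

theorem grp_head (l : List (List String)) :
    ∀ temp, grp temp l = (temp ++ l.takeWhile (fun y => !isLane y)) :: F l := by
  induction l with
  | nil => intro temp; simp [grp, F]
  | cons x xs ih =>
    intro temp
    by_cases h : isLane x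
    · rw [grp, if_pos h, F, if_pos h, List.takeWhile_cons]
      simp [h]
    · rw [grp, if_neg h, F, if_neg h, ih (temp ++ [x]), List.takeWhile_cons]
      simp [h]

theorem bnd_zero (l : List (List String)) : bnd l 0 = (l.takeWhile (fun y => !isLane y)).length := by
  induction l with
  | nil => simp [bnd, lanesOf]
  | cons x xs ih =>
    by_cases h : isLane x
    · simp [bnd, lanesOf, h]
    · rw [List.takeWhile_cons]
      simp only [bnd, lanesOf, h, if_neg, Bool.false_eq_true, not_false_iff, List.nil_append,
        Bool.not_eq_true'] at *
      simp only [if_true, List.length_cons, ← ih]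
      cases lanesOf xs <;> simp [List.getD]

theorem getD_append_shift (a : List Nat) (n j : Nat) (hj : j < a.length + 1) :
    ((a.map (· + 1)) ++ [n + 1]).getD j 0 = (a ++ [n]).getD j 0 + 1 := by
  have h1 : j < (a.map (· + 1) ++ [n + 1]).length := by simp; omega
  have h2 : j < (a ++ [n]).length := by simp; omega
  rw [List.getD_eq_getElem _ _ h1, List.getD_eq_getElem _ _ h2]
  rcases Nat.lt_or_ge j a.length with hlt | hge
  · rw [List.getElem_append_left (by simpa using hlt), List.getElem_append_left hlt,
      List.getElem_map]
  · have hj' : j = a.length := by omega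
    subst hj'
    rw [List.getElem_append_right (by simp), List.getElem_append_right (by omega)]
    simp

theorem bnd_cons_shift (x : List String) (xs : List (List String)) (j : Nat)
    (hj : j ≤ (lanesOf xs).length) :
    bnd (x :: xs) (if isLane x then j + 1 else j) = bnd xs j + 1 := by
  by_cases h : isLane x
  · rw [if_pos h]
    show ((if isLane x then [0] else []) ++ (lanesOf xs).map (· + 1) ++ [(x :: xs).length]).getD (j + 1) 0
        = (lanesOf xs ++ [xs.length]).getD j 0 + 1
    rw [if_pos h, List.singleton_append, List.cons_append, List.getD_cons_succ,
      List.length_cons, getD_append_shift _ _ _ (by omega)]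
  · rw [if_neg h]
    show ((if isLane x then [0] else []) ++ (lanesOf xs).map (· + 1) ++ [(x :: xs).length]).getD j 0
        = (lanesOf xs ++ [xs.length]).getD j 0 + 1
    rw [if_neg h, List.nil_append, List.length_cons, getD_append_shift _ _ _ (by omega)]

theorem takeWhile_eq_take_len (p : List String → Bool) (l : List (List String)) :
    l.take (l.takeWhile p).length = l.takeWhile p :=
  (List.prefix_iff_eq_take.mp (List.takeWhile_prefix p)).symm

theorem Bspec_eq_F (l : List (List String)) : Bspec l = F l := by
  induction l with
  | nil => simp [Bspec, lanesOf, F]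
  | cons x xs ih =>
    by_cases h : isLane x
    · -- lanesOf (x :: xs) = 0 :: shifted, so the first slice is x :: (prefix of xs up to its first lane)
      have hlanes : (lanesOf (x :: xs)).length = (lanesOf xs).length + 1 := by
        simp [lanesOf, h]
      have hb0 : bnd (x :: xs) 0 = 0 := by simp [bnd, lanesOf, h]
      have hshift : ∀ j, j ≤ (lanesOf xs).length → bnd (x :: xs) (j + 1) = bnd xs j + 1 := by
        intro j hj
        have hc := bnd_cons_shift x xs j hj
        rwa [if_pos h] at hc
      have hB : Bspec (x :: xs) = ((x :: xs).take (bnd xs 0 + 1)) :: Bspec xs := by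
        rw [Bspec, hlanes, List.range_succ_eq_map, List.map_cons, List.map_map]
        congr 1
        · rw [hb0, hshift 0 (by omega)]
          simp
        · apply List.map_congr_left
          intro j hj
          have hj' : j < (lanesOf xs).length := List.mem_range.mp hj
          simp only [Function.comp_apply, Nat.succ_eq_add_one]
          rw [hshift (j + 1) (by omega), hshift j (by omega), List.drop_succ_cons,
            Nat.add_sub_add_right]
      rw [hB, ih, F, if_pos h, grp_head xs [x], bnd_zero, List.take_succ_cons,
        takeWhile_eq_take_len]
      rfl
    · have hlanes : (lanesOf (x :: xs)).length = (lanesOf xs).length := by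
        simp [lanesOf, h]
      have hshift : ∀ j, j ≤ (lanesOf xs).length → bnd (x :: xs) j = bnd xs j + 1 := by
        intro j hj
        have hc := bnd_cons_shift x xs j hj
        rwa [if_neg h] at hc
      have hB : Bspec (x :: xs) = Bspec xs := by
        rw [Bspec, hlanes, Bspec]
        apply List.map_congr_left
        intro j hj
        have hj' : j < (lanesOf xs).length := List.mem_range.mp hj
        rw [hshift (j + 1) (by omega), hshift j (by omega), List.drop_succ_cons,
          Nat.add_sub_add_right]
      rw [hB, ih, F, if_neg h]

theorem lanes_int (l : List (List String)) : ∀ s : Int,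
    (PySem.List.enumerate l s).filterMap
        (fun p => if PySem.List.pyGetD p.2 0 "" == "lane" then some p.1 else none)
      = (lanesOf l).map (fun n : Nat => s + (n : Int)) := by
  induction l with
  | nil => intro s; simp [PySem.List.enumerate_nil, lanesOf]
  | cons x xs ih =>
    intro s
    have key : ((lanesOf xs).map (· + 1)).map (fun n : Nat => s + (n : Int))
        = (lanesOf xs).map (fun n : Nat => (s + 1) + (n : Int)) := by
      rw [List.map_map]
      apply List.map_congr_left
      intro n _
      show s + ((n + 1 : Nat) : Int) = s + 1 + (n : Int)
      push_cast
      ring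
    rw [PySem.List.enumerate_cons]
    by_cases h : isLane x
    · have hx : (fun p : Int × List String =>
          if PySem.List.pyGetD p.2 0 "" == "lane" then some p.1 else none) (s, x) = some s := by
        simp only [isLane] at h
        simp [h]
      simp only [List.filterMap_cons, hx, ih (s + 1)]
      show s :: (lanesOf xs).map (fun n : Nat => s + 1 + (n : Int))
          = ((if isLane x then [0] else []) ++ (lanesOf xs).map (· + 1)).map (fun n : Nat => s + (n : Int))
      rw [if_pos h, List.singleton_append, List.map_cons, ← key]
      norm_num
    · have hx : (fun p : Int × List String =>
          if PySem.List.pyGetD p.2 0 "" == "lane" then some p.1 else none) (s, x) = none := by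
        simp only [isLane] at h
        simp [h]
      simp only [List.filterMap_cons, hx, ih (s + 1)]
      show (lanesOf xs).map (fun n : Nat => s + 1 + (n : Int))
          = ((if isLane x then [0] else []) ++ (lanesOf xs).map (· + 1)).map (fun n : Nat => s + (n : Int))
      rw [if_neg h, List.nil_append, ← key]

theorem getD_cast (bs : List Nat) (j : Nat) (hj : j < bs.length) :
    ((bs.map (fun n : Nat => (n : Int))).getD j 0) = ((bs.getD j 0 : Nat) : Int) := by
  rw [List.getD_eq_getElem _ _ (by simpa using hj), List.getD_eq_getElem _ _ hj,
    List.getElem_map]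

theorem struct_read_alt_eq_Bspec (l : List (List String)) : struct_read_alt l = Bspec l := by
  have hl : ((PySem.List.enumerate l).filterMap
      (fun p => if PySem.List.pyGetD p.2 0 "" == "lane" then some p.1 else none))
      = (lanesOf l).map (fun n : Nat => (n : Int)) := by
    rw [lanes_int l 0]
    apply List.map_congr_left
    intro n _
    rw [Int.zero_add]
  have hbounds : (lanesOf l).map (fun n : Nat => (n : Int)) ++ [PySem.List.len l]
      = (lanesOf l ++ [l.length]).map (fun n : Nat => (n : Int)) := by
    rw [List.map_append, PySem.List.len_eq]
    rfl
  show (List.range (((PySem.List.enumerate l).filterMap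
      (fun p => if PySem.List.pyGetD p.2 0 "" == "lane" then some p.1 else none)).length)).map _ = _
  rw [hl, List.length_map, Bspec]
  apply List.map_congr_left
  intro j hj
  have hj' : j < (lanesOf l).length := List.mem_range.mp hj
  rw [hbounds, getD_cast _ j (by simp; omega), getD_cast _ (j + 1) (by simp; omega),
    PySem.List.slice_natCast]
  rfl

-- ===== VERDICT (by name: the statement is the Claim_ definition above) =====
theorem struct_read_spec : Claim_equal_struct_read := by
  intro list _ _
  show struct_read list = struct_read_alt list
  rw [struct_read_eq_F, struct_read_alt_eq_Bspec, Bspec_eq_F]
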